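-- pv_equiv track=rewrite | github.com/hazerMf/Code-Ptit | BT/ki22324/PYTH_W10_2.py | Count
-- ===== SOURCE A (Python) =====
-- def Count(k,n):
--     cnt = 0
--     for i in range(1,k):
--         dem = 0
--         for char in str(i):
--             dem += int(char)
--         if dem == n:
--             cnt+=1
--     return cnt
-- ===== SOURCE B (Python) =====
-- def Count(k, n):
--     # Digit DP: cur[s] = number of x in [0, m) with digit sum s, built over the
--     # decimal prefixes of k from shortest to longest; O(log k * min(n, 9 log k)).
--     if k <= 1 or n < 0:
--         return 0
--     prefixes = []
--     m = k
--     while m > 0: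
--         prefixes.append(m)
--         m //= 10
--     if n > 9 * len(prefixes):
--         return 0
--     cur = [0] * (n + 1)
--     sq = 0  # digit sum of the prefix already processed
--     for p in reversed(prefixes):
--         r = p % 10
--         nxt = []
--         for s in range(n + 1):
--             t = 0
--             for d in range(10):
--                 if d <= s:
--                     t += cur[s - d]
--             for d in range(r):
--                 if sq + d == s:
--                     t += 1
--             nxt.append(t)
--         cur = nxt
--         sq += r
--     return cur[n] - (1 if n == 0 else 0)
-- ===== Notes on version B (the rewrite author's own statement) =====
-- stated objective: faster
-- what changed: Replaced the brute-force scan of every integer in [1,k) (summing the digits of each via str) by a digit DP that builds, prefix by prefix of k, a table of counts of numbers with each digit sum, so the work drops from O(k log k) to O(log k * min(n, 9 log k)).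
import Mathlib
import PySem

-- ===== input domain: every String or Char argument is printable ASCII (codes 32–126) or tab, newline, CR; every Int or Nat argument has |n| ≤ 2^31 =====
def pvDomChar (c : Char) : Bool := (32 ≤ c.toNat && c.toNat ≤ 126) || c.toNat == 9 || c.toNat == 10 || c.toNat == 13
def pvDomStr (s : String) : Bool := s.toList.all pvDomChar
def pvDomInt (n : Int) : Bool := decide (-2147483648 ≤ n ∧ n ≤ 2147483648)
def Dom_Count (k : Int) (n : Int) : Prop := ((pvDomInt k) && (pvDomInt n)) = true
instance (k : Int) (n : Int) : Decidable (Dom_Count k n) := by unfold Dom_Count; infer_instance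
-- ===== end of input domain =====

-- B replaces A's O(k log k) scan of [1,k) by a digit DP over the decimal prefixes of k (objective: faster, measured).

-- ===== PORT A =====
-- literal port of A: for i in range(1,k): sum int(char) over str(i); count the i with digit sum n.
-- int(char) is ported as (ofChars? [c]).getD 0; on the digit characters str(i) yields it is never none, so this is exact.
def Count (k : Int) (n : Int) : Int :=
  (PySem.List.pyRange 1 k 1).foldl (fun cnt i =>
    let dem := (PySem.Int.toChars i).foldl (fun dem c => dem + ((PySem.Int.ofChars? [c]).getD 0)) 0
    if dem = n then cnt + 1 else cnt) 0


-- ===== PORT B =====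
-- prefixes of k: [k, k//10, k//100, ...] down to the last positive one (Source B's while-loop)
def prefsB (m : Int) : List Int :=
  if h : 0 < m then m :: prefsB (PySem.Int.floordiv m 10) else []
  termination_by m.toNat
  decreasing_by
    rw [PySem.Int.floordiv_eq_ediv_of_pos (by omega : (0:Int) < 10)]
    omega


-- literal port of Source B: each python loop is the obvious fold over the same state
def Count_alt (k : Int) (n : Int) : Int :=
  if k ≤ 1 then 0
  else if n < 0 then 0
  else
    let prefixes := prefsB k
    if 9 * (prefixes.length : Int) < n then 0
    else
      let cur0 : List Int := List.replicate (n + 1).toNat 0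
      let st := prefixes.reverse.foldl (fun (st : List Int × Int) p =>
          let cur := st.1
          let sq := st.2
          let r := PySem.Int.mod p 10
          let nxt := (PySem.List.pyRange 0 (n + 1) 1).foldl (fun acc s =>
              let t1 := (PySem.List.pyRange 0 10 1).foldl (fun t d =>
                  if d ≤ s then t + PySem.List.pyGetD cur (s - d) 0 else t) 0
              let t2 := (PySem.List.pyRange 0 r 1).foldl (fun t d =>
                  if sq + d = s then t + 1 else t) t1
              acc ++ [t2]) []
          (nxt, sq + r)) (cur0, (0 : Int))
      PySem.List.pyGetD st.1 n 0 - (if n = 0 then 1 else 0)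


-- ===== PRECONDITION & SPEC =====
def Spec_Count (k : Int) (n : Int) (out : Int) : Prop := out = Count_alt k n
instance (k : Int) (n : Int) (out : Int) : Decidable (Spec_Count k n out) := by unfold Spec_Count; infer_instance

-- ===== CLAIM (what is proved, stated in full; the proofs are below) =====
def Claim_equal_Count : Prop := ∀ (k : Int) (n : Int), Dom_Count k n → Spec_Count k n (Count k n)

-- ===== LEMMAS AND PROOFS =====

def dS (m : Nat) : Nat :=
  if m = 0 then 0 else m % 10 + dS (m / 10)
  termination_by m
  decreasing_by omega

def fA (dem : Int) (c : Char) : Int := dem + ((PySem.Int.ofChars? [c]).getD 0)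

lemma ofChars_digitChar (r : Nat) (h : r < 10) :
    ((PySem.Int.ofChars? [Nat.digitChar r]).getD 0) = (r : Int) := by
  interval_cases r <;> decide

lemma dS_zero : dS 0 = 0 := by simp [dS]

lemma dS_eq (m : Nat) : dS m = m % 10 + dS (m / 10) := by
  by_cases h : m = 0
  · subst h; simp [dS]
  · rw [dS]; simp [h]

lemma core_sum : ∀ fuel n : Nat, ∀ (ds : List Char) (a : Int), n < fuel →
    (Nat.toDigitsCore 10 fuel n ds).foldl fA a = ds.foldl fA (a + (dS n : Nat)) := by
  intro fuel
  induction fuel with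
  | zero => intro n ds a h; omega
  | succ f ih =>
    intro n ds a h
    rw [Nat.toDigitsCore]
    have h10 : n % 10 < 10 := Nat.mod_lt _ (by omega)
    by_cases h0 : n / 10 = 0
    · have hd : dS n = n % 10 := by rw [dS_eq, h0, dS_zero]; omega
      simp [h0, fA, ofChars_digitChar _ h10, hd]
    · have hrec : n / 10 < f := by omega
      simp only [h0, reduceIte]
      rw [ih _ _ _ hrec, List.foldl_cons]
      simp only [fA, ofChars_digitChar _ h10]
      rw [dS_eq n]
      push_cast
      ring_nf

lemma toChars_sum (i : Int) (h : 0 ≤ i) :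
    (PySem.Int.toChars i).foldl fA 0 = ((dS i.toNat : Nat) : Int) := by
  unfold PySem.Int.toChars
  rw [if_neg (by omega)]
  unfold Nat.toDigits
  rw [core_sum _ _ _ _ (by omega)]
  simp

def cntN (m s : Nat) : Nat := (List.range m).countP (fun x => dS x = s)

lemma cntN_zero (s : Nat) : cntN 0 s = 0 := by simp [cntN]

lemma cntN_succ (m s : Nat) :
    cntN (m+1) s = cntN m s + (if dS m = s then 1 else 0) := by
  simp [cntN, List.range_succ, List.countP_append, List.countP_cons]

lemma dS10 (q r : Nat) (h : r < 10) : dS (10*q + r) = dS q + r := by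
  by_cases h0 : 10*q + r = 0
  · have hq : q = 0 := by omega
    have hr : r = 0 := by omega
    simp [hq, hr, dS_zero]
  · rw [dS_eq (10*q + r)]
    have e1 : (10*q + r) % 10 = r := by omega
    have e2 : (10*q + r) / 10 = q := by omega
    rw [e1, e2]; omega

lemma K3 (q s : Nat) : ∀ r, r ≤ 10 →
    cntN (10*q + r) s
      = cntN (10*q) s + ((List.range r).map (fun d => if dS q + d = s then 1 else 0)).sum := by
  intro r
  induction r with
  | zero => simp
  | succ r ih =>
    intro h
    have : 10*q + (r+1) = (10*q + r) + 1 := by omega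
    rw [this, cntN_succ, ih (by omega), dS10 q r (by omega), List.range_succ]
    simp [List.sum_append]
    omega

lemma K4 (q s : Nat) :
    cntN (10*q) s
      = ((List.range 10).map (fun d => if d ≤ s then cntN q (s - d) else 0)).sum := by
  induction q generalizing s with
  | zero => simp [cntN_zero]
  | succ q ih =>
    have h1 : 10*(q+1) = 10*q + 10 := by omega
    rw [h1, K3 q s 10 (le_refl _), ih]
    have pt : ∀ d : Nat,
        (if d ≤ s then cntN q (s - d) else 0) + (if dS q + d = s then 1 else 0)
          = (if d ≤ s then cntN (q+1) (s - d) else 0) := by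
      intro d
      by_cases hds : d ≤ s
      · rw [if_pos hds, if_pos hds, cntN_succ]
        by_cases he : dS q = s - d
        · rw [if_pos he, if_pos (by omega)]
        · rw [if_neg he, if_neg (by omega)]
      · rw [if_neg hds, if_neg hds, if_neg (by omega)]
    calc ((List.range 10).map (fun d => if d ≤ s then cntN q (s - d) else 0)).sum
          + ((List.range 10).map (fun d => if dS q + d = s then 1 else 0)).sum
        = ((List.range 10).map (fun d =>
            (if d ≤ s then cntN q (s - d) else 0) + (if dS q + d = s then 1 else 0))).sum := by
          exact (List.sum_map_add (l := List.range 10)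
            (f := fun d => if d ≤ s then cntN q (s - d) else 0)
            (g := fun d => if dS q + d = s then 1 else 0)).symm
      _ = ((List.range 10).map (fun d => if d ≤ s then cntN (q+1) (s - d) else 0)).sum := by
          exact congrArg List.sum (List.map_congr_left (fun d _ => pt d))

lemma dS_le (L m : Nat) (h : m < 10 ^ L) : dS m ≤ 9 * L := by
  induction L generalizing m with
  | zero => simp at h; simp [h, dS_zero]
  | succ L ih =>
    rw [dS_eq]
    have h1 : m / 10 < 10 ^ L := by
      have : (10:Nat) ^ (L+1) = 10 ^ L * 10 := pow_succ 10 L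
      omega
    have := ih (m / 10) h1
    have : m % 10 < 10 := Nat.mod_lt _ (by omega)
    omega

lemma prefsB_nil (m : Int) (h : m ≤ 0) : prefsB m = [] := by
  rw [prefsB]; simp [show ¬ 0 < m by omega]

lemma prefsB_cons (m : Int) (h : 0 < m) :
    prefsB m = m :: prefsB (PySem.Int.floordiv m 10) := by
  rw [prefsB]; simp [h]

lemma prefsB_bound : ∀ m : Int, m.toNat < 10 ^ (prefsB m).length := by
  intro m
  by_cases h : 0 < m
  · rw [prefsB_cons m h]
    have hd : PySem.Int.floordiv m 10 = m / 10 :=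
      PySem.Int.floordiv_eq_ediv_of_pos (by omega)
    have ih := prefsB_bound (PySem.Int.floordiv m 10)
    rw [hd] at ih ⊢
    have h2 : (m / 10).toNat = m.toNat / 10 := by omega
    rw [h2] at ih
    simp only [List.length_cons]
    have : (10:Nat) ^ ((prefsB (m/10)).length + 1) = 10 ^ (prefsB (m/10)).length * 10 :=
      pow_succ 10 _
    omega
  · rw [prefsB_nil m (by omega)]
    simp
    omega
  termination_by m => m.toNat
  decreasing_by
    rw [PySem.Int.floordiv_eq_ediv_of_pos (by omega : (0:Int) < 10)]
    omega

def tbl (q L : Nat) : List Int := (List.range L).map (fun j => (cntN q j : Int))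

lemma tbl_zero (L : Nat) : tbl 0 L = List.replicate L 0 := by
  simp [tbl, cntN_zero]

-- the body of B's per-prefix step, applied to the correct table for q = p / 10
lemma step_eq (n p : Int) (hn : 0 ≤ n) (hp : 0 < p) :
    (fun (st : List Int × Int) (p : Int) =>
      let cur := st.1
      let sq := st.2
      let r := PySem.Int.mod p 10
      let nxt := (PySem.List.pyRange 0 (n + 1) 1).foldl (fun acc s =>
          let t1 := (PySem.List.pyRange 0 10 1).foldl (fun t d =>
              if d ≤ s then t + PySem.List.pyGetD cur (s - d) 0 else t) 0
          let t2 := (PySem.List.pyRange 0 r 1).foldl (fun t d =>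
              if sq + d = s then t + 1 else t) t1
          acc ++ [t2]) []
      (nxt, sq + r))
      (tbl (p.toNat / 10) (n+1).toNat, ((dS (p.toNat / 10) : Nat) : Int)) p
    = (tbl p.toNat (n+1).toNat, ((dS p.toNat : Nat) : Int)) := by
  set L := (n+1).toNat with hL
  set qN := p.toNat / 10 with hq
  set rN := p.toNat % 10 with hr
  have hrN : rN < 10 := by omega
  have hmod : PySem.Int.mod p 10 = ((rN : Nat) : Int) := by
    rw [PySem.Int.mod_eq_emod_of_pos (by omega)]; omega
  dsimp only
  rw [hmod]
  simp only [Prod.mk.injEq]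
  refine ⟨?_, ?_⟩
  · -- first component: the new table
    rw [PySem.List.foldl_append_singleton_eq_map]
    simp only [List.nil_append]
    rw [PySem.List.pyRange_zero (n+1), List.map_map]
    show _ = tbl p.toNat L
    unfold tbl
    apply List.map_congr_left
    intro sN hmem
    have hsL : sN < L := List.mem_range.mp hmem
    simp only [Function.comp]
    -- inner sum over d in range(10)
    rw [show (10:Int) = ((10:Nat):Int) from rfl, PySem.List.pyRange_zero_nat 10, List.foldl_map]
    rw [PySem.List.foldl_congr_mem (List.range 10) _
      (fun t d => t + (if d ≤ sN then ((cntN qN (sN - d) : Nat) : Int) else 0)) 0 ?congr1]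
    case congr1 =>
      intro t d hd
      have hd10 : d < 10 := List.mem_range.mp hd
      dsimp only
      by_cases hds : d ≤ sN
      · have hdsI : (d:Int) ≤ (sN:Int) := by exact_mod_cast hds
        have e1 : (sN : Int) - (d : Int) = ((sN - d : Nat) : Int) := by omega
        rw [if_pos hdsI, if_pos hds, e1, PySem.List.pyGetD_natCast,
          PySem.List.getD_map_range _ _ _ _ (by omega : sN - d < L)]
      · have hdsI : ¬ ((d:Int) ≤ (sN:Int)) := by exact_mod_cast hds
        rw [if_neg hdsI, if_neg hds, add_zero]
    rw [PySem.List.foldl_add]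
    have hsum1 : ((List.range 10).map (fun d => if d ≤ sN then ((cntN qN (sN - d) : Nat) : Int) else 0)).sum
        = ((cntN (10 * qN) sN : Nat) : Int) := by
      rw [K4, Nat.cast_list_sum, List.map_map]
      congr 1
      apply List.map_congr_left
      intro d _
      simp [apply_ite (fun x : Nat => (x : Int))]
    rw [hsum1]
    -- second loop over d in range(r)
    rw [PySem.List.pyRange_zero_nat rN, List.foldl_map]
    rw [PySem.List.foldl_congr_mem (List.range rN) _
      (fun t d => t + (if dS qN + d = sN then (1:Int) else 0)) _ ?congr2]
    case congr2 =>
      intro t d _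
      dsimp only
      by_cases hc : dS qN + d = sN
      · have hcI : ((dS qN : Nat) : Int) + (d:Int) = (sN:Int) := by exact_mod_cast hc
        rw [if_pos hcI, if_pos hc]
      · have hcI : ¬ (((dS qN : Nat) : Int) + (d:Int) = (sN:Int)) := by exact_mod_cast hc
        rw [if_neg hcI, if_neg hc, add_zero]
    rw [PySem.List.foldl_add]
    have hsum2 : ((List.range rN).map (fun d => if dS qN + d = sN then (1:Int) else 0)).sum
        = (((List.range rN).map (fun d => if dS qN + d = sN then (1:Nat) else 0)).sum : Int) := by
      rw [Nat.cast_list_sum, List.map_map]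
      congr 1
      apply List.map_congr_left
      intro d _
      simp [apply_ite (fun x : Nat => (x : Int))]
    rw [hsum2]
    have := K3 qN sN rN (by omega)
    have hp10 : 10 * qN + rN = p.toNat := by omega
    rw [hp10] at this
    rw [show (0:Int) + ((cntN (10 * qN) sN : Nat) : Int) = ((cntN (10 * qN) sN : Nat) : Int) by ring]
    rw [← Nat.cast_add, ← this]
  · -- second component: the running digit sum
    have : dS p.toNat = dS qN + rN := by
      rw [show p.toNat = 10 * qN + rN by omega, dS10 _ _ hrN]
    rw [this]
    push_cast
    ring

lemma invB (n : Int) (hn : 0 ≤ n) : ∀ m : Int,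
    (prefsB m).reverse.foldl (fun (st : List Int × Int) (p : Int) =>
      let cur := st.1
      let sq := st.2
      let r := PySem.Int.mod p 10
      let nxt := (PySem.List.pyRange 0 (n + 1) 1).foldl (fun acc s =>
          let t1 := (PySem.List.pyRange 0 10 1).foldl (fun t d =>
              if d ≤ s then t + PySem.List.pyGetD cur (s - d) 0 else t) 0
          let t2 := (PySem.List.pyRange 0 r 1).foldl (fun t d =>
              if sq + d = s then t + 1 else t) t1
          acc ++ [t2]) []
      (nxt, sq + r)) (List.replicate (n + 1).toNat 0, (0:Int))
    = (tbl m.toNat (n+1).toNat, ((dS m.toNat : Nat) : Int)) := by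
  intro m
  by_cases h : 0 < m
  · rw [prefsB_cons m h, List.reverse_cons, List.foldl_append]
    have hd : PySem.Int.floordiv m 10 = m / 10 :=
      PySem.Int.floordiv_eq_ediv_of_pos (by omega)
    have ih := invB n hn (PySem.Int.floordiv m 10)
    rw [ih, List.foldl_cons, List.foldl_nil]
    have hq : (PySem.Int.floordiv m 10).toNat = m.toNat / 10 := by
      rw [hd]; omega
    rw [hq]
    exact step_eq n m hn h
  · rw [prefsB_nil m (by omega), List.reverse_nil, List.foldl_nil,
      show m.toNat = 0 by omega, tbl_zero, dS_zero]
    simp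
  termination_by m => m.toNat
  decreasing_by
    rw [PySem.Int.floordiv_eq_ediv_of_pos (by omega : (0:Int) < 10)]
    omega

lemma cntN_head (m s : Nat) :
    cntN (m+1) s = (if s = 0 then 1 else 0) + (List.range m).countP (fun j => dS (j+1) = s) := by
  rw [cntN, List.range_succ_eq_map, List.countP_cons, List.countP_map]
  have h0 : (decide (dS 0 = s)) = decide (s = 0) := by
    rw [dS_zero]; by_cases h : s = 0 <;> simp [h]; omega
  simp only [h0]
  have : ((fun x => decide (dS x = s)) ∘ Nat.succ) = fun j => decide (dS (j+1) = s) := by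
    funext j; rfl
  rw [this]
  by_cases h : s = 0 <;> simp [h] <;> omega

lemma Count_eq (k n : Int) :
    Count k n
      = ((List.range (k-1).toNat).countP (fun j => decide (((dS (j+1) : Nat) : Int) = n)) : Int) := by
  unfold Count
  rw [PySem.List.foldl_congr_mem _ _
    (fun cnt i => if (fun i : Int => decide (((dS i.toNat : Nat) : Int) = n)) i = true
                  then cnt + 1 else cnt) 0 ?h1]
  case h1 =>
    intro cnt i hi
    have h1 : 1 ≤ i := (PySem.List.mem_pyRange_one.mp hi).1
    dsimp only
    rw [show (fun (dem : Int) (c : Char) => dem + ((PySem.Int.ofChars? [c]).getD 0)) = fA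
        from rfl, toChars_sum i (by omega)]
    simp
  rw [PySem.List.foldl_count_if]
  rw [PySem.List.pyRange_one, List.countP_map]
  simp only [Int.zero_add]
  congr 1
  apply List.countP_congr
  intro j _
  have : (1 + (j:Int)).toNat = j + 1 := by omega
  simp [this]

lemma count_eq_count_alt (k n : Int) : Count k n = Count_alt k n := by
  by_cases hk : k ≤ 1
  · unfold Count Count_alt
    rw [PySem.List.pyRange_one_eq_nil hk, List.foldl_nil, if_pos hk]
  · replace hk : 1 < k := by omega
    by_cases hn : n < 0
    · rw [Count_eq]
      unfold Count_alt
      rw [if_neg (by omega), if_pos hn]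
      have : (List.range (k-1).toNat).countP (fun j => decide (((dS (j+1) : Nat) : Int) = n)) = 0 := by
        apply List.countP_eq_zero.mpr
        intro j _
        simp only [decide_eq_true_eq]
        omega
      rw [this]; rfl
    · replace hn : 0 ≤ n := by omega
      by_cases hbig : 9 * ((prefsB k).length : Int) < n
      · rw [Count_eq]
        unfold Count_alt
        rw [if_neg (by omega), if_neg (by omega)]
        simp only [if_pos hbig]
        have : (List.range (k-1).toNat).countP (fun j => decide (((dS (j+1) : Nat) : Int) = n)) = 0 := by
          apply List.countP_eq_zero.mpr
          intro j hj
          have hjlt : j < (k-1).toNat := List.mem_range.mp hj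
          have hb : j + 1 < 10 ^ (prefsB k).length := by
            have := prefsB_bound k
            omega
          have := dS_le ((prefsB k).length) (j+1) hb
          simp only [decide_eq_true_eq]
          omega
        rw [this]; rfl
      · -- main case
        unfold Count_alt
        rw [if_neg (by omega), if_neg (by omega)]
        simp only [if_neg hbig]
        rw [invB n hn k]
        dsimp only
        unfold tbl
        have hnL : n < ((List.map (fun j => ((cntN k.toNat j : Nat) : Int)) (List.range (n+1).toNat)).length : Int) := by
          rw [List.length_map, List.length_range]; omega
        rw [PySem.List.pyGetD_eq_getElem _ 0 hn hnL]
        rw [List.getElem_map, List.getElem_range]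
        rw [Count_eq]
        have hcnt := cntN_head ((k-1).toNat) n.toNat
        have hk1 : (k-1).toNat + 1 = k.toNat := by omega
        rw [hk1] at hcnt
        have hpred : (List.range (k-1).toNat).countP (fun j => decide (((dS (j+1) : Nat) : Int) = n))
            = (List.range (k-1).toNat).countP (fun j => decide (dS (j+1) = n.toNat)) := by
          apply List.countP_congr
          intro j _
          simp only [decide_eq_true_eq]
          omega
        rw [hpred, hcnt]
        by_cases h0 : n = 0
        · rw [if_pos (by omega : n.toNat = 0), if_pos h0]
          push_cast
          ring
        · rw [if_neg (by omega : ¬ n.toNat = 0), if_neg h0]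
          push_cast
          ring

-- ===== VERDICT (by name: the statement is the Claim_ definition above) =====
theorem Count_spec : Claim_equal_Count := by
  intro k n _
  unfold Spec_Count
  exact count_eq_count_alt k n
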